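-- pv_equiv track=rewrite | github.com/juditapreiss/ne_obfuscation | src/hubert_models.py | convert_to_io_chars
-- ===== SOURCE A (Python) =====
-- def convert_to_io_chars(original):
--     inside = 0
--     text = ''
--     for letter in original:
--         if letter == '|' and inside == 0:
--             inside = 1
--             character = 'n'
--         elif letter == '$' and inside == 0:
--             inside = 1
--             character = 'l'
--         elif letter == "{" and inside == 0:
--             inside = 1
--             character = 'e'
--         elif letter == ']' and inside:
--             inside = 0
--         elif letter == ' ':
--             if inside == 1:
--                 text += character
--             else:
--                 text += ' '
--         else:
--             if inside:
--                 text += character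
--             else:
--                 text += 'o'
--
--     return text.strip()
-- ===== SOURCE B (Python) =====
-- def convert_to_io_chars(original):
--     # Region-based bulk-fill pass instead of a char-by-char state machine.
--     fills = {'|': 'n', '$': 'l', '{': 'e'}
--     parts = []
--     i = 0
--     n = len(original)
--     while i < n:
--         j = i
--         while j < n and original[j] not in fills:
--             j += 1
--         parts.append(''.join(' ' if c == ' ' else 'o' for c in original[i:j]))
--         if j < n:
--             k = original.find(']', j + 1)
--             if k == -1:
--                 k = n
--             parts.append(fills[original[j]] * (k - j - 1))
--             i = k + 1
--         else:
--             i = j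
--     return ''.join(parts).strip()
-- ===== Notes on version B (the rewrite author's own statement) =====
-- stated objective: alternative
-- what changed: Replaces the char-by-char inside/outside state machine with a region-based pass: find each opener, bulk-map the gap before it, then bulk-fill the region up to its closer (or end of string) with the opener's fill character, joining the parts at the end.
import Mathlib
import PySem

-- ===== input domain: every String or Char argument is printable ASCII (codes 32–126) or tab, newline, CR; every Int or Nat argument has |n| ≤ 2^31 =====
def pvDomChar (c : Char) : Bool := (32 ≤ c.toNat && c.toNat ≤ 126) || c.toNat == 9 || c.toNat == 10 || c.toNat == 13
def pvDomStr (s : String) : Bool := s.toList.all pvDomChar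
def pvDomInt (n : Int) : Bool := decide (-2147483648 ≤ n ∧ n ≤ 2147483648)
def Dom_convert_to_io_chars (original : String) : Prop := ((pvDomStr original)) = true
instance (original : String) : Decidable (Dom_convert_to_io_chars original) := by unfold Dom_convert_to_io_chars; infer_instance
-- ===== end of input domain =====

-- B replaces A's char-by-char inside/outside state machine with a region-find-then-bulk-fill pass (alternative structure, same cost).

-- ===== PORT A =====
-- one step of A's for-loop; state = (inside, character, text); 'character' starts unread (dummy 'o')
def aStep (st : Int × Char × List Char) (letter : Char) : Int × Char × List Char :=
  match st with
  | (inside, character, text) =>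
    if letter = '|' ∧ inside = 0 then (1, 'n', text)
    else if letter = '$' ∧ inside = 0 then (1, 'l', text)
    else if letter = '{' ∧ inside = 0 then (1, 'e', text)
    else if letter = ']' ∧ inside ≠ 0 then (0, character, text)
    else if letter = ' ' then
      (if inside = 1 then (inside, character, text ++ [character])
       else (inside, character, text ++ [' ']))
    else if inside ≠ 0 then (inside, character, text ++ [character])
    else (inside, character, text ++ ['o'])

def convert_to_io_chars (original : String) : String :=
  String.mk (PySem.Chars.strip (original.toList.foldl aStep (0, 'o', [])).2.2)

-- ===== PORT B =====
-- fills lookup: opener -> fill char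
def bFill (c : Char) : Option Char :=
  if c = '|' then some 'n' else if c = '$' then some 'l' else if c = '{' then some 'e' else none

def bGapChar (c : Char) : Char := if c = ' ' then ' ' else 'o'

-- B's outer loop: map the gap before the next opener, then bulk-fill the region to the closer (or end)
def bGo : List Char → List Char
  | [] => []
  | c :: rest =>
    match bFill c with
    | none => bGapChar c :: bGo rest
    | some f =>
      let content := rest.takeWhile (fun x => x ≠ ']')
      List.replicate content.length f ++ bGo (rest.drop (content.length + 1))
termination_by l => l.length
decreasing_by
  · simp
  · simpa using Nat.lt_succ_of_le (List.length_drop .. ▸ Nat.sub_le _ _)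

def convert_to_io_chars_alt (original : String) : String :=
  String.mk (PySem.Chars.strip (bGo original.toList))

-- ===== PRECONDITION & SPEC =====
def Spec_convert_to_io_chars (original : String) (out : String) : Prop := out = convert_to_io_chars_alt original
instance (original : String) (out : String) : Decidable (Spec_convert_to_io_chars original out) := by unfold Spec_convert_to_io_chars; infer_instance

-- ===== CLAIM (what is proved, stated in full; the proofs are below) =====
def Claim_equal_convert_to_io_chars : Prop := ∀ (original : String), Dom_convert_to_io_chars original → Spec_convert_to_io_chars original (convert_to_io_chars original)

-- ===== LEMMAS AND PROOFS =====
-- joint loop invariant: A's fold from the outside state produces bGo; from the inside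
-- state it produces the bulk fill of the region followed by bGo of the remainder
lemma aFold_key (l : List Char) :
    (∀ ch acc, (l.foldl aStep (0, ch, acc)).2.2 = acc ++ bGo l) ∧
    (∀ f acc, (l.foldl aStep (1, f, acc)).2.2 =
      acc ++ List.replicate (l.takeWhile (fun x => x ≠ ']')).length f ++
        bGo (l.drop ((l.takeWhile (fun x => x ≠ ']')).length + 1))) := by
  induction l with
  | nil => simp [bGo]
  | cons c rest ih =>
    constructor
    · intro ch acc
      by_cases h1 : c = '|'
      · simp [aStep, h1, bGo, bFill, (ih.2 'n' acc)]
      by_cases h2 : c = '$'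
      · simp [aStep, h1, h2, bGo, bFill, (ih.2 'l' acc)]
      by_cases h3 : c = '{'
      · simp [aStep, h1, h2, h3, bGo, bFill, (ih.2 'e' acc)]
      by_cases h4 : c = ' '
      · simp [aStep, h1, h2, h3, h4, bGo, bFill, bGapChar, (ih.1 ch (acc ++ [' ']))]
      · simp [aStep, h1, h2, h3, h4, bGo, bFill, bGapChar, (ih.1 ch (acc ++ ['o']))]
    · intro f acc
      by_cases h : c = ']'
      · simp [aStep, h, (ih.1 f acc)]
      · have step : (aStep (1, f, acc) c) = (1, f, acc ++ [f]) := by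
          simp [aStep, h]
        simp only [List.foldl_cons, step, List.takeWhile_cons, h, decide_eq_true_eq,
          if_pos, ne_eq, not_false_iff, decide_true, List.length_cons,
          List.replicate_succ, List.drop_succ_cons, (ih.2 f (acc ++ [f]))]
        simp

theorem convert_to_io_chars_spec : Claim_equal_convert_to_io_chars := by
  intro original _
  unfold Spec_convert_to_io_chars convert_to_io_chars convert_to_io_chars_alt
  rw [(aFold_key original.toList).1 'o' []]
  rfl
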